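-- pv_equiv track=rewrite | github.com/TaliaPr/Natural-Language-Processing | Classificación_secuencias/Funciones.py | extract_confusion_matrix
-- ===== SOURCE A (Python) =====
-- from typing import Dict, List, Tuple, Union, Set, Any, Optional, Callable
--
-- def extract_confusion_matrix(gold_entities: List[Tuple[str, int, int]], pred_entities: List[Tuple[str, int, int]]) -> Dict[Tuple[str, str], int]:
--     """
--     Extract confusion matrix for entity recognition.
--
--     Args:
--         gold_entities: List of gold standard entity tuples (type, start, end)
--         pred_entities: List of predicted entity tuples (type, start, end)
--
--     Returns:
--         Dictionary representing the confusion matrix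
--     """
--     confusion_matrix = {}
--     # Build confusion matrix
--
--     # Track positions that have been processed
--     processed_positions = set()
--
--     # For each gold entity, find if it was correctly predicted
--     for gold_entity in gold_entities:
--         gold_type, start, end = gold_entity
--
--         # Look for predicted entity at the same position
--         matched = False
--         for pred_entity in pred_entities:
--             pred_type, p_start, p_end = pred_entity
--
--             if start == p_start and end == p_end:  # Check exact match
--                 # Update confusion matrix
--                 confusion_key = (gold_type, pred_type)
--                 confusion_matrix[confusion_key] = confusion_matrix.get(confusion_key, 0) + 1
--                 matched = True
--                 # Mark this position as processed
--                 processed_positions.add((p_start, p_end))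
--                 break
--
--         # If no matching prediction was found, it's a false negative
--         if not matched:
--             confusion_key = (gold_type, "O")  # "O" represents no prediction
--             confusion_matrix[confusion_key] = confusion_matrix.get(confusion_key, 0) + 1
--
--     # Process false positives (predictions without gold)
--     for pred_entity in pred_entities:
--         pred_type, p_start, p_end = pred_entity
--         # Check if this prediction has already been processed (matched with gold)
--         if (p_start, p_end) not in processed_positions:
--             confusion_key = ("O", pred_type)  # "O" represents no gold entity
--             confusion_matrix[confusion_key] = confusion_matrix.get(confusion_key, 0) + 1
--
--     # Add true negatives count (O,O) - this requires knowing the total number of tokens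
--     # that should be labeled as "O" in both gold and predicted data
--     # We need to add additional information to correctly count (O,O) cases
--
--     return confusion_matrix
-- ===== SOURCE B (Python) =====
-- def extract_confusion_matrix(gold_entities, pred_entities):
--     # Index of the FIRST predicted type at each (start, end) position.
--     pred_first = {}
--     for pred_type, p_start, p_end in pred_entities:
--         pred_first.setdefault((p_start, p_end), pred_type)
--     # Positions covered by some gold entity.
--     gold_positions = {(s, e) for _, s, e in gold_entities}
--     confusion_matrix = {}
--     # Each gold entity pairs with the first prediction at its position (or "O").
--     for gold_type, start, end in gold_entities:
--         key = (gold_type, pred_first.get((start, end), "O"))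
--         confusion_matrix[key] = confusion_matrix.get(key, 0) + 1
--     # Predictions at positions no gold entity covers are false positives.
--     for pred_type, p_start, p_end in pred_entities:
--         if (p_start, p_end) not in gold_positions:
--             key = ("O", pred_type)
--             confusion_matrix[key] = confusion_matrix.get(key, 0) + 1
--     return confusion_matrix
-- ===== Notes on version B (the rewrite author's own statement) =====
-- stated objective: faster
-- what changed: B replaces A's nested scan of pred_entities per gold entity with two precomputed position-keyed indices (first predicted type per (start,end) and the set of gold positions) and two flat passes.
import Mathlib
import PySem

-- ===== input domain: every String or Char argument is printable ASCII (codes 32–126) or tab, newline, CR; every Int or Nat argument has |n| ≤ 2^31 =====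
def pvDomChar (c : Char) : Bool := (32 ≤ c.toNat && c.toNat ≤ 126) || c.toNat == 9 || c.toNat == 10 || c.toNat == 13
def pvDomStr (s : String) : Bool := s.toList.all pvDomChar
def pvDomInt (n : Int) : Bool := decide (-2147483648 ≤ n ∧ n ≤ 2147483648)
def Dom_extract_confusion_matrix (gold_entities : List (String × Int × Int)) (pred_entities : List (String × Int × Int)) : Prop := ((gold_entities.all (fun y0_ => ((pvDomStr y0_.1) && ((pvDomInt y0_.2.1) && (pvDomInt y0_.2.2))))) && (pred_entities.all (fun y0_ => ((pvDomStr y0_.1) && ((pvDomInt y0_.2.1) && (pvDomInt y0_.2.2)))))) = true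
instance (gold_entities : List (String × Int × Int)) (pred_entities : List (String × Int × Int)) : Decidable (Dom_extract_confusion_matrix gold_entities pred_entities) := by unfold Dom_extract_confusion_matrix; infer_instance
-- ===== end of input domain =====

-- B replaces A's inner scan over pred_entities with precomputed position indices; two flat passes instead of a nested loop.

-- ===== PORT A =====
-- inner 'for pred_entity in pred_entities: … break' loop of A
def pvAFind (gold_type : String) (start fin : Int) (preds : List (String × Int × Int))
    (cm : PySem.Dict (String × String) Int) (processed : PySem.Set (Int × Int)) :
    PySem.Dict (String × String) Int × PySem.Set (Int × Int) × Bool :=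
  match preds with
  | [] => (cm, processed, false)
  | (pred_type, p_start, p_end) :: rest =>
    if start = p_start ∧ fin = p_end then
      (cm.insert (gold_type, pred_type) (cm.getD (gold_type, pred_type) 0 + 1),
       PySem.Set.add processed (p_start, p_end), true)
    else
      pvAFind gold_type start fin rest cm processed

def extract_confusion_matrix (gold_entities : List (String × Int × Int)) (pred_entities : List (String × Int × Int)) : List (String × String × Int) :=
  let st := gold_entities.foldl
    (fun (st : PySem.Dict (String × String) Int × PySem.Set (Int × Int)) g =>
      let (gold_type, start, fin) := g
      let (cm, processed, matched) := pvAFind gold_type start fin pred_entities st.1 st.2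
      if matched then (cm, processed)
      else (cm.insert (gold_type, "O") (cm.getD (gold_type, "O") 0 + 1), processed))
    ((PySem.Dict.empty : PySem.Dict (String × String) Int), (PySem.Set.empty : PySem.Set (Int × Int)))
  let cm := pred_entities.foldl
    (fun cm p =>
      let (pred_type, p_start, p_end) := p
      if PySem.Set.contains st.2 (p_start, p_end) then cm
      else cm.insert ("O", pred_type) (cm.getD ("O", pred_type) 0 + 1))
    st.1
  cm.items.map (fun kv => (kv.1.1, kv.1.2, kv.2))

-- ===== PORT B =====
def extract_confusion_matrix_alt (gold_entities : List (String × Int × Int)) (pred_entities : List (String × Int × Int)) : List (String × String × Int) :=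
  let pred_first := pred_entities.foldl
    (fun d p => PySem.Dict.setdefault d (p.2.1, p.2.2) p.1)
    (PySem.Dict.empty : PySem.Dict (Int × Int) String)
  let gold_positions := PySem.Set.ofList (gold_entities.map (fun g => (g.2.1, g.2.2)))
  let cm1 := gold_entities.foldl
    (fun cm g =>
      let key := (g.1, pred_first.getD (g.2.1, g.2.2) "O")
      cm.insert key (cm.getD key 0 + 1))
    (PySem.Dict.empty : PySem.Dict (String × String) Int)
  let cm := pred_entities.foldl
    (fun cm p =>
      if PySem.Set.contains gold_positions (p.2.1, p.2.2) then cm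
      else cm.insert ("O", p.1) (cm.getD ("O", p.1) 0 + 1))
    cm1
  cm.items.map (fun kv => (kv.1.1, kv.1.2, kv.2))

-- ===== PRECONDITION & SPEC =====
def Spec_extract_confusion_matrix (gold_entities : List (String × Int × Int)) (pred_entities : List (String × Int × Int)) (out : List (String × String × Int)) : Prop := out = extract_confusion_matrix_alt gold_entities pred_entities
instance (gold_entities : List (String × Int × Int)) (pred_entities : List (String × Int × Int)) (out : List (String × String × Int)) : Decidable (Spec_extract_confusion_matrix gold_entities pred_entities out) := by unfold Spec_extract_confusion_matrix; infer_instance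

-- ===== CLAIM (what is proved, stated in full; the proofs are below) =====
def Claim_equal_extract_confusion_matrix : Prop := ∀ (gold_entities : List (String × Int × Int)) (pred_entities : List (String × Int × Int)), Dom_extract_confusion_matrix gold_entities pred_entities → Spec_extract_confusion_matrix gold_entities pred_entities (extract_confusion_matrix gold_entities pred_entities)

-- ===== LEMMAS AND PROOFS =====

-- first predicted type at a position (what pred_first.get(pos) evaluates to)
def pvFirstAt (pos : Int × Int) (preds : List (String × Int × Int)) : Option String :=
  preds.findSome? (fun p => if (p.2.1, p.2.2) = pos then some p.1 else none)

lemma pvAFind_eq (gt : String) (s e : Int) (preds : List (String × Int × Int))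
    (cm : PySem.Dict (String × String) Int) (pr : PySem.Set (Int × Int)) :
    pvAFind gt s e preds cm pr =
      match pvFirstAt (s, e) preds with
      | some pt => (cm.insert (gt, pt) (cm.getD (gt, pt) 0 + 1), PySem.Set.add pr (s, e), true)
      | none => (cm, pr, false) := by
  induction preds with
  | nil => rfl
  | cons p rest ih =>
    obtain ⟨pt, ps, pe⟩ := p
    simp only [pvAFind, pvFirstAt, List.findSome?_cons]
    by_cases h : s = ps ∧ e = pe
    · obtain ⟨h1, h2⟩ := h
      subst h1; subst h2
      simp
    · have hne : ¬ ((ps, pe) = (s, e)) := by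
        intro hc; exact h ⟨(Prod.mk.injEq _ _ _ _ ▸ hc).1.symm, (Prod.mk.injEq _ _ _ _ ▸ hc).2.symm⟩
      simp only [if_neg h, if_neg hne]
      exact ih

lemma setdefault_fold_get? (preds : List (String × Int × Int)) (d : PySem.Dict (Int × Int) String)
    (pos : Int × Int) :
    (preds.foldl (fun d p => PySem.Dict.setdefault d (p.2.1, p.2.2) p.1) d).get? pos
      = (d.get? pos).or (pvFirstAt pos preds) := by
  induction preds generalizing d with
  | nil => simp [pvFirstAt]
  | cons p rest ih =>
    simp only [List.foldl_cons, pvFirstAt, List.findSome?_cons]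
    by_cases hc : d.contains (p.2.1, p.2.2) = true
    · have hsd : PySem.Dict.setdefault d (p.2.1, p.2.2) p.1 = d := by
        simp [PySem.Dict.setdefault, hc]
      rw [hsd, ih]
      by_cases hp : (p.2.1, p.2.2) = pos
      · subst hp
        have : (d.get? (p.2.1, p.2.2)).isSome := by
          rw [← PySem.Dict.contains_eq_isSome_get?]; exact hc
        obtain ⟨v, hv⟩ := Option.isSome_iff_exists.mp this
        simp [hv]
      · simp [pvFirstAt, hp]
    · have hsd : PySem.Dict.setdefault d (p.2.1, p.2.2) p.1 = d.insert (p.2.1, p.2.2) p.1 := by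
        apply PySem.Dict.ext
        rw [PySem.Dict.items_insert_of_not_contains _ _ (by simpa using hc)]
        simp [PySem.Dict.setdefault, hc]
      rw [hsd, ih]
      by_cases hp : (p.2.1, p.2.2) = pos
      · subst hp
        have hnone : d.get? (p.2.1, p.2.2) = none := by
          rw [PySem.Dict.get?_eq_none_iff_contains]
          simpa using hc
        rw [PySem.Dict.get?_insert_self, hnone]
        simp
      · rw [PySem.Dict.get?_insert_of_ne _ _ (fun h => hp h.symm)]
        simp [pvFirstAt, hp]

lemma firstAt_isSome_of_mem {preds : List (String × Int × Int)} {p : String × Int × Int}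
    (hp : p ∈ preds) : (pvFirstAt (p.2.1, p.2.2) preds).isSome := by
  rw [pvFirstAt, List.findSome?_isSome_iff]
  exact ⟨p, hp, by simp⟩

lemma stepA_some {preds : List (String × Int × Int)} {g : String × Int × Int} {pt : String}
    (hfa : pvFirstAt (g.2.1, g.2.2) preds = some pt)
    (cm : PySem.Dict (String × String) Int) (pr : PySem.Set (Int × Int)) :
    (if (pvAFind g.1 g.2.1 g.2.2 preds cm pr).2.2 = true then
            ((pvAFind g.1 g.2.1 g.2.2 preds cm pr).1, (pvAFind g.1 g.2.1 g.2.2 preds cm pr).2.1)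
          else
            ((pvAFind g.1 g.2.1 g.2.2 preds cm pr).1.insert (g.1, "O")
                ((pvAFind g.1 g.2.1 g.2.2 preds cm pr).1.getD (g.1, "O") 0 + 1),
              (pvAFind g.1 g.2.1 g.2.2 preds cm pr).2.1))
      = (cm.insert (g.1, pt) (cm.getD (g.1, pt) 0 + 1), PySem.Set.add pr (g.2.1, g.2.2)) := by
  simp [pvAFind_eq, hfa]

lemma stepA_none {preds : List (String × Int × Int)} {g : String × Int × Int}
    (hfa : pvFirstAt (g.2.1, g.2.2) preds = none)
    (cm : PySem.Dict (String × String) Int) (pr : PySem.Set (Int × Int)) :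
    (if (pvAFind g.1 g.2.1 g.2.2 preds cm pr).2.2 = true then
            ((pvAFind g.1 g.2.1 g.2.2 preds cm pr).1, (pvAFind g.1 g.2.1 g.2.2 preds cm pr).2.1)
          else
            ((pvAFind g.1 g.2.1 g.2.2 preds cm pr).1.insert (g.1, "O")
                ((pvAFind g.1 g.2.1 g.2.2 preds cm pr).1.getD (g.1, "O") 0 + 1),
              (pvAFind g.1 g.2.1 g.2.2 preds cm pr).2.1))
      = (cm.insert (g.1, "O") (cm.getD (g.1, "O") 0 + 1), pr) := by
  simp [pvAFind_eq, hfa]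

-- the gold loop: cm parts agree, and the processed set's membership is characterized
lemma gold_fold_eq (preds : List (String × Int × Int)) (gold : List (String × Int × Int))
    (cm : PySem.Dict (String × String) Int) (pr : PySem.Set (Int × Int)) :
    (gold.foldl
        (fun (st : PySem.Dict (String × String) Int × PySem.Set (Int × Int)) g =>
          if (pvAFind g.1 g.2.1 g.2.2 preds st.1 st.2).2.2 = true then
            ((pvAFind g.1 g.2.1 g.2.2 preds st.1 st.2).1, (pvAFind g.1 g.2.1 g.2.2 preds st.1 st.2).2.1)
          else
            ((pvAFind g.1 g.2.1 g.2.2 preds st.1 st.2).1.insert (g.1, "O")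
                ((pvAFind g.1 g.2.1 g.2.2 preds st.1 st.2).1.getD (g.1, "O") 0 + 1),
              (pvAFind g.1 g.2.1 g.2.2 preds st.1 st.2).2.1))
        (cm, pr)).1
      = gold.foldl
          (fun cm g =>
            cm.insert (g.1, (pvFirstAt (g.2.1, g.2.2) preds).getD "O")
              (cm.getD (g.1, (pvFirstAt (g.2.1, g.2.2) preds).getD "O") 0 + 1)) cm
    ∧ ∀ pos : Int × Int,
        pos ∈ (gold.foldl
        (fun (st : PySem.Dict (String × String) Int × PySem.Set (Int × Int)) g =>
          if (pvAFind g.1 g.2.1 g.2.2 preds st.1 st.2).2.2 = true then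
            ((pvAFind g.1 g.2.1 g.2.2 preds st.1 st.2).1, (pvAFind g.1 g.2.1 g.2.2 preds st.1 st.2).2.1)
          else
            ((pvAFind g.1 g.2.1 g.2.2 preds st.1 st.2).1.insert (g.1, "O")
                ((pvAFind g.1 g.2.1 g.2.2 preds st.1 st.2).1.getD (g.1, "O") 0 + 1),
              (pvAFind g.1 g.2.1 g.2.2 preds st.1 st.2).2.1))
        (cm, pr)).2
        ↔ pos ∈ pr ∨ (pos ∈ gold.map (fun g => (g.2.1, g.2.2)) ∧ (pvFirstAt pos preds).isSome) := by
  induction gold generalizing cm pr with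
  | nil => simp
  | cons g rest ih =>
    cases hfa : pvFirstAt (g.2.1, g.2.2) preds with
    | some pt =>
      simp only [List.foldl_cons]
      rw [stepA_some hfa]
      refine ⟨?_, ?_⟩
      · rw [(ih _ _).1]
        simp [hfa]
      · intro pos
        rw [(ih _ _).2, PySem.Set.mem_add]
        simp only [List.map_cons, List.mem_cons]
        by_cases hpos : pos = (g.2.1, g.2.2)
        · subst hpos; simp [hfa]
        · simp only [hpos, false_or]
          try tauto
    | none =>
      simp only [List.foldl_cons]
      rw [stepA_none hfa]
      refine ⟨?_, ?_⟩
      · rw [(ih _ _).1]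
        simp [hfa]
      · intro pos
        rw [(ih _ _).2]
        simp only [List.map_cons, List.mem_cons]
        by_cases hpos : pos = (g.2.1, g.2.2)
        · subst hpos; simp [hfa]
        · simp only [hpos, false_or]
          try tauto

lemma fp_fold_congr (preds : List (String × Int × Int))
    (pr : PySem.Set (Int × Int)) (gp : PySem.Set (Int × Int))
    (h : ∀ p ∈ preds, (PySem.Set.contains pr (p.2.1, p.2.2)) = (PySem.Set.contains gp (p.2.1, p.2.2)))
    (cm : PySem.Dict (String × String) Int) :
    preds.foldl
      (fun cm p =>
        if PySem.Set.contains pr (p.2.1, p.2.2) then cm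
        else cm.insert ("O", p.1) (cm.getD ("O", p.1) 0 + 1)) cm
    = preds.foldl
      (fun cm p =>
        if PySem.Set.contains gp (p.2.1, p.2.2) then cm
        else cm.insert ("O", p.1) (cm.getD ("O", p.1) 0 + 1)) cm := by
  induction preds generalizing cm with
  | nil => rfl
  | cons p rest ih =>
    simp only [List.foldl_cons]
    rw [h p (List.mem_cons_self)]
    exact ih (fun q hq => h q (List.mem_cons_of_mem _ hq)) _

-- ===== VERDICT (by name: the statement is the Claim_ definition above) =====
theorem extract_confusion_matrix_spec : Claim_equal_extract_confusion_matrix := by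
  intro gold preds _
  unfold Spec_extract_confusion_matrix extract_confusion_matrix extract_confusion_matrix_alt
  simp only []
  have hpf : ∀ pos : Int × Int,
      (preds.foldl (fun d p => PySem.Dict.setdefault d (p.2.1, p.2.2) p.1)
        (PySem.Dict.empty : PySem.Dict (Int × Int) String)).getD pos "O"
      = (pvFirstAt pos preds).getD "O" := by
    intro pos
    rw [PySem.Dict.getD_eq_get?_getD, setdefault_fold_get?]
    simp
  simp only [hpf]
  obtain ⟨hcm, hmem⟩ := gold_fold_eq preds gold PySem.Dict.empty PySem.Set.empty
  rw [← hcm]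
  have hcond : ∀ p ∈ preds,
      PySem.Set.contains (gold.foldl
        (fun (st : PySem.Dict (String × String) Int × PySem.Set (Int × Int)) g =>
          if (pvAFind g.1 g.2.1 g.2.2 preds st.1 st.2).2.2 = true then
            ((pvAFind g.1 g.2.1 g.2.2 preds st.1 st.2).1, (pvAFind g.1 g.2.1 g.2.2 preds st.1 st.2).2.1)
          else
            ((pvAFind g.1 g.2.1 g.2.2 preds st.1 st.2).1.insert (g.1, "O")
                ((pvAFind g.1 g.2.1 g.2.2 preds st.1 st.2).1.getD (g.1, "O") 0 + 1),
              (pvAFind g.1 g.2.1 g.2.2 preds st.1 st.2).2.1))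
        ((PySem.Dict.empty : PySem.Dict (String × String) Int), (PySem.Set.empty : PySem.Set (Int × Int)))).2
        (p.2.1, p.2.2)
      = PySem.Set.contains (PySem.Set.ofList (gold.map (fun g => (g.2.1, g.2.2)))) (p.2.1, p.2.2) := by
    intro p hp
    have hs : (pvFirstAt (p.2.1, p.2.2) preds).isSome := firstAt_isSome_of_mem hp
    rw [Bool.eq_iff_iff]
    simp only [PySem.Set.contains, List.contains_iff_mem]
    rw [hmem (p.2.1, p.2.2)]
    rw [show ((p.2.1, p.2.2) ∈ PySem.Set.ofList (gold.map (fun g => (g.2.1, g.2.2)))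
        ↔ (p.2.1, p.2.2) ∈ gold.map (fun g => (g.2.1, g.2.2))) from PySem.Set.mem_ofList _ _]
    simp [PySem.Set.empty, hs]
  rw [fp_fold_congr preds _ _ hcond]
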